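-- pv_equiv track=rewrite | github.com/taivu1998/ResNet-Regularization-Pruning | flopsCount.py | cifar_resnet_flop
-- ===== SOURCE A (Python) =====
-- def cifar_resnet_flop(layer = 110, prune_rate = 1):
--     '''
--     Compares the number of FLOPs for a ResNet model with a pruning rate.
--
--     Args:
--         layer (int): The ResNet network size for CIFAR.
--         prune_rate (int): Compression rate, 1 means baseline.
--
--     Returns:
--         int: The number of FLOPs of the network.
--     '''
--     flop = 0
--     channel = [16, 32, 64]
--     width = [32, 16, 8]
--
--     stage = int(layer / 3)
--     for index in range(0, layer, 1):
--         if index == 0:  # first conv layer before block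
--             flop += channel[0] * width[0] * width[0] * 9 * 3 * prune_rate
--         elif index in [1, 2]:  # first block of first stage
--             flop += channel[0] * width[0] * width[0] * 9 * channel[0] * (prune_rate ** 2)
--         elif 2 < index <= stage:  # other blocks of first stage
--             if index % 2 != 0:
--                 # first layer of block, only output channal reduced, input channel remain the same
--                 flop += channel[0] * width[0] * width[0] * 9 * channel[0] * (prune_rate)
--             elif index % 2 == 0:
--                 # second layer of block, both input and output channal reduced
--                 flop += channel[0] * width[0] * width[0] * 9 * channel[0] * (prune_rate ** 2)
--         elif stage < index <= stage * 2:  # second stage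
--             if index % 2 != 0:
--                 flop += channel[1] * width[1] * width[1] * 9 * channel[1] * (prune_rate)
--             elif index % 2 == 0:
--                 flop += channel[1] * width[1] * width[1] * 9 * channel[1] * (prune_rate ** 2)
--         elif stage * 2 < index <= stage * 3:  # third stage
--             if index % 2 != 0:
--                 flop += channel[2] * width[2] * width[2] * 9 * channel[2] * (prune_rate)
--             elif index % 2 == 0:
--                 flop += channel[2] * width[2] * width[2] * 9 * channel[2] * (prune_rate ** 2)
--
--     # offset for dimension change between blocks
--     offset1 = channel[1] * width[1] * width[1] * 9 * channel[1] * prune_rate - channel[1] * width[1] * width[1] * 9 * \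
--               channel[0] * prune_rate
--     offset2 = channel[2] * width[2] * width[2] * 9 * channel[2] * prune_rate - channel[2] * width[2] * width[2] * 9 * \
--               channel[1] * prune_rate
--     flop = flop - offset1 - offset2
--     return flop
-- ===== SOURCE B (Python) =====
-- def cifar_resnet_flop(layer = 110, prune_rate = 1):
--     '''
--     Closed-form FLOP count for a pruned CIFAR ResNet: no per-index loop.
--     Every conv of a residual block costs the same base number of FLOPs in
--     all three stages, so each stage's total reduces to counting the odd and
--     even conv indices inside that stage's index range.
--     '''
--     p = prune_rate
--     channel = [16, 32, 64]
--     width = [32, 16, 8]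
--     stage = layer // 3
--     flop = 0
--     if layer > 0:
--         flop += channel[0] * width[0] * width[0] * 9 * 3 * p        # stem conv, index 0
--     for i in (1, 2):                                                # very first block: input channels unpruned on both convs
--         if i < layer:
--             flop += channel[0] * width[0] * width[0] * 9 * channel[0] * p * p
--     for s in range(3):
--         base = channel[s] * width[s] * width[s] * 9 * channel[s]
--         lo = max(s * stage, 2) + 1                 # stage s spans indices s*stage+1 .. (s+1)*stage; 1 and 2 were counted above
--         hi = min((s + 1) * stage, layer - 1)       # the network has only `layer` conv layers
--         if lo <= hi:
--             odds = (hi + 1) // 2 - lo // 2         # first conv of a block: output side pruned only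
--             evens = hi // 2 - (lo - 1) // 2        # second conv of a block: both sides pruned
--             flop += base * (odds * p + evens * p * p)
--     # corrections at the two stage transitions, where the input channel count changes
--     flop -= channel[1] * width[1] * width[1] * 9 * (channel[1] - channel[0]) * p
--     flop -= channel[2] * width[2] * width[2] * 9 * (channel[2] - channel[1]) * p
--     return flop
-- ===== Notes on version B (the rewrite author's own statement) =====
-- stated objective: faster
-- what changed: Replaces the per-index loop over range(layer) with a closed form: each stage's conv layers cost the same per-conv base, so B counts odd and even indices in each stage's index range arithmetically.
import Mathlib
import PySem

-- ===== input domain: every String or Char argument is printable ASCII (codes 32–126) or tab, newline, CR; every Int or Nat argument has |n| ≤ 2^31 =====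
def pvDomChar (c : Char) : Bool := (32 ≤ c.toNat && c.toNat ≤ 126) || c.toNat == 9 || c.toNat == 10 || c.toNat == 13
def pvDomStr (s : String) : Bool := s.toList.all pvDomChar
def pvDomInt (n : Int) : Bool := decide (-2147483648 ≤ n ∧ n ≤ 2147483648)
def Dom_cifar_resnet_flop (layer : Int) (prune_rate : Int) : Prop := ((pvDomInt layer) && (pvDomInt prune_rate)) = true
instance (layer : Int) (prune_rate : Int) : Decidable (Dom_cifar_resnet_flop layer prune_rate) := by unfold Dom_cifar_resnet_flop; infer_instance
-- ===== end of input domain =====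

-- B replaces A's per-index loop by a closed-form per-stage count of odd/even conv indices (objective: faster).

-- ===== PORT A =====
-- A's loop body, with channel/width values inlined: channel = [16,32,64], width = [32,16,8].
def pvStepA (stage prune_rate flop index : Int) : Int :=
  if index = 0 then
    flop + 16*32*32*9*3*prune_rate
  else if index = 1 ∨ index = 2 then
    flop + 16*32*32*9*16*(prune_rate ^ 2)
  else if 2 < index ∧ index ≤ stage then
    (if PySem.Int.mod index 2 ≠ 0 then flop + 16*32*32*9*16*prune_rate
     else if PySem.Int.mod index 2 = 0 then flop + 16*32*32*9*16*(prune_rate ^ 2)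
     else flop)
  else if stage < index ∧ index ≤ stage*2 then
    (if PySem.Int.mod index 2 ≠ 0 then flop + 32*16*16*9*32*prune_rate
     else if PySem.Int.mod index 2 = 0 then flop + 32*16*16*9*32*(prune_rate ^ 2)
     else flop)
  else if stage*2 < index ∧ index ≤ stage*3 then
    (if PySem.Int.mod index 2 ≠ 0 then flop + 64*8*8*9*64*prune_rate
     else if PySem.Int.mod index 2 = 0 then flop + 64*8*8*9*64*(prune_rate ^ 2)
     else flop)
  else flop

def cifar_resnet_flop (layer : Int) (prune_rate : Int) : Int :=
  -- stage = int(layer / 3): float division then truncation; exact for |layer| ≤ 2^31 < 2^53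
  let stage := PySem.Int.truncdiv layer 3
  let flop := (PySem.List.pyRange 0 layer 1).foldl (pvStepA stage prune_rate) 0
  let offset1 := 32*16*16*9*32*prune_rate - 32*16*16*9*16*prune_rate
  let offset2 := 64*8*8*9*64*prune_rate - 64*8*8*9*32*prune_rate
  flop - offset1 - offset2

-- ===== PORT B =====
def cifar_resnet_flop_alt (layer : Int) (prune_rate : Int) : Int :=
  let p := prune_rate
  let channel : List Int := [16, 32, 64]
  let width : List Int := [32, 16, 8]
  let stage := PySem.Int.floordiv layer 3
  let flop : Int := 0
  let flop := if 0 < layer then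
      flop + PySem.List.pyGetD channel 0 0 * PySem.List.pyGetD width 0 0 * PySem.List.pyGetD width 0 0 * 9 * 3 * p
    else flop
  let flop := [(1 : Int), 2].foldl (fun flop i =>
      if i < layer then
        flop + PySem.List.pyGetD channel 0 0 * PySem.List.pyGetD width 0 0 * PySem.List.pyGetD width 0 0 * 9 * PySem.List.pyGetD channel 0 0 * p * p
      else flop) flop
  let flop := (PySem.List.pyRange 0 3 1).foldl (fun flop s =>
      let base := PySem.List.pyGetD channel s 0 * PySem.List.pyGetD width s 0 * PySem.List.pyGetD width s 0 * 9 * PySem.List.pyGetD channel s 0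
      let lo := max (s * stage) 2 + 1
      let hi := min ((s + 1) * stage) (layer - 1)
      if lo ≤ hi then
        let odds := PySem.Int.floordiv (hi + 1) 2 - PySem.Int.floordiv lo 2
        let evens := PySem.Int.floordiv hi 2 - PySem.Int.floordiv (lo - 1) 2
        flop + base * (odds * p + evens * p * p)
      else flop) flop
  let flop := flop - PySem.List.pyGetD channel 1 0 * PySem.List.pyGetD width 1 0 * PySem.List.pyGetD width 1 0 * 9 * (PySem.List.pyGetD channel 1 0 - PySem.List.pyGetD channel 0 0) * p
  flop - PySem.List.pyGetD channel 2 0 * PySem.List.pyGetD width 2 0 * PySem.List.pyGetD width 2 0 * 9 * (PySem.List.pyGetD channel 2 0 - PySem.List.pyGetD channel 1 0) * p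

-- ===== PRECONDITION & SPEC =====
def Spec_cifar_resnet_flop (layer : Int) (prune_rate : Int) (out : Int) : Prop := out = cifar_resnet_flop_alt layer prune_rate
instance (layer : Int) (prune_rate : Int) (out : Int) : Decidable (Spec_cifar_resnet_flop layer prune_rate out) := by unfold Spec_cifar_resnet_flop; infer_instance

-- ===== CLAIM (what is proved, stated in full; the proofs are below) =====
def Claim_equal_cifar_resnet_flop : Prop := ∀ (layer : Int) (prune_rate : Int), Dom_cifar_resnet_flop layer prune_rate → Spec_cifar_resnet_flop layer prune_rate (cifar_resnet_flop layer prune_rate)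

-- ===== LEMMAS AND PROOFS =====

-- contribution of A's loop body at a given index (per-index view of pvStepA)
def pvGA (s p i : Int) : Int :=
  if i = 0 then 442368 * p
  else if i = 1 ∨ i = 2 then 2359296 * p ^ 2
  else if 2 < i ∧ i ≤ 3 * s then (if i % 2 ≠ 0 then 2359296 * p else 2359296 * p ^ 2)
  else 0

-- closed form of A's loop total after n iterations
def pvFc (s p n : Int) : Int :=
  (if 1 ≤ n then 442368 * p else 0)
  + (if 2 ≤ n then 2359296 * p ^ 2 else 0)
  + (if 3 ≤ n then 2359296 * p ^ 2 else 0)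
  + (if 3 ≤ min (n - 1) (3 * s) then
       2359296 * (((min (n - 1) (3 * s) + 1) / 2 - 1) * p + (min (n - 1) (3 * s) / 2 - 1) * p ^ 2)
     else 0)

-- coefficient view of A's single-range count
def pvOddA (L : Int) : Int :=
  if 3 ≤ min (L - 1) (3 * (L / 3)) then (min (L - 1) (3 * (L / 3)) + 1) / 2 - 1 else 0
def pvEvenA (L : Int) : Int :=
  if 3 ≤ min (L - 1) (3 * (L / 3)) then min (L - 1) (3 * (L / 3)) / 2 - 1 else 0

-- coefficient view of B's per-stage counts
def pvLoB (k L : Int) : Int := max (k * (L / 3)) 2 + 1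
def pvHiB (k L : Int) : Int := min ((k + 1) * (L / 3)) (L - 1)
def pvOddB (L : Int) : Int :=
  (if pvLoB 0 L ≤ pvHiB 0 L then (pvHiB 0 L + 1) / 2 - pvLoB 0 L / 2 else 0)
  + (if pvLoB 1 L ≤ pvHiB 1 L then (pvHiB 1 L + 1) / 2 - pvLoB 1 L / 2 else 0)
  + (if pvLoB 2 L ≤ pvHiB 2 L then (pvHiB 2 L + 1) / 2 - pvLoB 2 L / 2 else 0)
def pvEvenB (L : Int) : Int :=
  (if pvLoB 0 L ≤ pvHiB 0 L then pvHiB 0 L / 2 - (pvLoB 0 L - 1) / 2 else 0)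
  + (if pvLoB 1 L ≤ pvHiB 1 L then pvHiB 1 L / 2 - (pvLoB 1 L - 1) / 2 else 0)
  + (if pvLoB 2 L ≤ pvHiB 2 L then pvHiB 2 L / 2 - (pvLoB 2 L - 1) / 2 else 0)

lemma pvStepA_eq_add (s p f i : Int) (hs : 0 ≤ s) : pvStepA s p f i = f + pvGA s p i := by
  simp only [pvStepA, pvGA, PySem.Int.mod_eq_emod_of_pos (by omega : (0:Int) < 2)]
  split_ifs <;> first | (exfalso; omega) | ring

lemma pvSum_eq_Fc (s p : Int) (hs : 0 ≤ s) (n : Nat) :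
    ((PySem.List.pyRange 0 (n : Int) 1).map (pvGA s p)).sum = pvFc s p n := by
  induction n with
  | zero =>
    rw [PySem.List.pyRange_one_eq_nil (by omega)]
    simp only [pvFc]
    norm_num
  | succ n ih =>
    have hcast : ((n + 1 : Nat) : Int) = (n : Int) + 1 := by push_cast; ring
    rw [hcast, PySem.List.pyRange_one_succ_right (Int.natCast_nonneg n), List.map_append,
      List.sum_append, ih]
    simp only [List.map_cons, List.map_nil, List.sum_cons, List.sum_nil, add_zero]
    generalize hm : (n : Int) = m at *
    have hm0 : 0 ≤ m := by omega
    simp only [pvFc, pvGA]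
    rcases (by omega : m < 3 ∨ 3 ≤ m) with h3 | h3
    · rw [if_neg (show ¬ (3:Int) ≤ min (m - 1) (3 * s) by omega),
        if_neg (show ¬ (3:Int) ≤ min (m + 1 - 1) (3 * s) by omega)]
      rcases (by omega : m = 0 ∨ m = 1 ∨ m = 2) with h | h | h <;> subst h <;> norm_num
    · simp only [if_pos (show (1:Int) ≤ m by omega), if_pos (show (2:Int) ≤ m by omega),
        if_pos (show (3:Int) ≤ m by omega), if_pos (show (1:Int) ≤ m + 1 by omega),
        if_pos (show (2:Int) ≤ m + 1 by omega), if_pos (show (3:Int) ≤ m + 1 by omega),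
        if_neg (show ¬ m = 0 by omega), if_neg (show ¬ (m = 1 ∨ m = 2) by omega)]
      rcases (by omega : m ≤ 3 * s ∨ 3 * s < m) with hle | hgt
      · rw [if_pos (show 2 < m ∧ m ≤ 3 * s by omega),
          min_eq_left (show m + 1 - 1 ≤ 3 * s by omega),
          if_pos (show (3:Int) ≤ m + 1 - 1 by omega)]
        rcases (by omega : m = 3 ∨ 4 ≤ m) with h4 | h4
        · subst h4
          rw [if_neg (show ¬ (3:Int) ≤ min (3 - 1) (3 * s) by omega)]
          norm_num
        · rw [min_eq_left (show m - 1 ≤ 3 * s by omega),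
            if_pos (show (3:Int) ≤ m - 1 by omega)]
          rcases Int.emod_two_eq m with he | ho
          · rw [if_neg (show ¬ m % 2 ≠ 0 by omega)]
            have e1 : (m - 1 + 1) / 2 = (m + 1 - 1 + 1) / 2 := by omega
            have e2 : (m - 1) / 2 = (m + 1 - 1) / 2 - 1 := by omega
            rw [e1, e2]; ring
          · rw [if_pos (show m % 2 ≠ 0 by omega)]
            have e1 : (m - 1 + 1) / 2 = (m + 1 - 1 + 1) / 2 - 1 := by omega
            have e2 : (m - 1) / 2 = (m + 1 - 1) / 2 := by omega
            rw [e1, e2]; ring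
      · rw [if_neg (show ¬ (2 < m ∧ m ≤ 3 * s) by omega),
          min_eq_right (show 3 * s ≤ m - 1 by omega),
          min_eq_right (show 3 * s ≤ m + 1 - 1 by omega)]
        ring

-- B's port, rewritten as stem + first-block + odd/even coefficients
lemma pvAlt_shape (L p : Int) :
    cifar_resnet_flop_alt L p =
      (if 0 < L then 442368 * p else 0)
      + ((if 1 < L then (1:Int) else 0) + (if 2 < L then (1:Int) else 0)) * (2359296 * (p * p))
      + 2359296 * (pvOddB L * p + pvEvenB L * (p * p))
      - 2359296 * p := by
  have h3 : PySem.List.pyRange 0 3 1 = [0, 1, 2] := by decide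
  have hd2 : ∀ a : Int, PySem.Int.floordiv a 2 = a / 2 :=
    fun a => PySem.Int.floordiv_eq_ediv_of_pos (by omega)
  have hd3 : PySem.Int.floordiv L 3 = L / 3 :=
    PySem.Int.floordiv_eq_ediv_of_pos (by omega)
  have g0 : PySem.List.pyGetD [(16:Int), 32, 64] 0 0 = 16 := by decide
  have g1 : PySem.List.pyGetD [(16:Int), 32, 64] 1 0 = 32 := by decide
  have g2 : PySem.List.pyGetD [(16:Int), 32, 64] 2 0 = 64 := by decide
  have w0 : PySem.List.pyGetD [(32:Int), 16, 8] 0 0 = 32 := by decide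
  have w1 : PySem.List.pyGetD [(32:Int), 16, 8] 1 0 = 16 := by decide
  have w2 : PySem.List.pyGetD [(32:Int), 16, 8] 2 0 = 8 := by decide
  simp only [cifar_resnet_flop_alt, h3, hd2, hd3, List.foldl_cons, List.foldl_nil,
    g0, g1, g2, w0, w1, w2, pvOddB, pvEvenB, pvLoB, pvHiB]
  split_ifs <;> ring

-- the single-range and the per-stage odd/even counts agree
set_option maxHeartbeats 1000000 in
lemma pvOdd_eq (L : Int) : pvOddA L = pvOddB L := by
  simp only [pvOddA, pvOddB, pvLoB, pvHiB, min_def, max_def]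
  split_ifs <;> omega

set_option maxHeartbeats 1000000 in
lemma pvEven_eq (L : Int) : pvEvenA L = pvEvenB L := by
  simp only [pvEvenA, pvEvenB, pvLoB, pvHiB, min_def, max_def]
  split_ifs <;> omega

-- ===== VERDICT (by name: the statement is the Claim_ definition above) =====
theorem cifar_resnet_flop_spec : Claim_equal_cifar_resnet_flop := by
  intro L p _
  simp only [Spec_cifar_resnet_flop]
  rw [pvAlt_shape, ← pvOdd_eq, ← pvEven_eq]
  simp only [cifar_resnet_flop, PySem.Int.truncdiv]
  rcases (by omega : L ≤ 0 ∨ 0 < L) with hneg | hpos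
  · rw [PySem.List.pyRange_one_eq_nil hneg]
    have hO : pvOddA L = 0 := by
      simp only [pvOddA]; rw [if_neg (by omega)]
    have hE : pvEvenA L = 0 := by
      simp only [pvEvenA]; rw [if_neg (by omega)]
    simp only [List.foldl_nil, hO, hE]
    rw [if_neg (show ¬ (0:Int) < L by omega), if_neg (show ¬ (1:Int) < L by omega),
      if_neg (show ¬ (2:Int) < L by omega)]
    ring
  · obtain ⟨n, rfl⟩ : ∃ n : Nat, L = (n : Int) := ⟨L.toNat, by omega⟩
    have hdiv : ((n : Int)).tdiv 3 = (n : Int) / 3 :=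
      Int.tdiv_eq_ediv_of_nonneg (Int.natCast_nonneg n)
    have hs : 0 ≤ (n : Int) / 3 := by positivity
    have hfun : pvStepA ((n : Int) / 3) p = fun acc x => acc + pvGA ((n : Int) / 3) p x := by
      funext f i; exact pvStepA_eq_add _ _ _ _ hs
    rw [hdiv, hfun, PySem.List.foldl_add, pvSum_eq_Fc _ _ hs]
    simp only [pvFc, pvOddA, pvEvenA]
    split_ifs <;> first | (exfalso; omega) | ring
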